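-- pv_equiv track=rewrite | github.com/zzz136454872/leetcode | beautifulBouquet.py | beautifulBouquet
-- ===== SOURCE A (Python) =====
-- from collections import defaultdict
-- from typing import List
--
-- def beautifulBouquet(flowers: List[int], cnt: int) -> int:
--     mem = defaultdict(int)
--     j = 0
--     res = 0
--     mod = 10**9 + 7
--     cnt += 1
--
--     for i in range(len(flowers)):
--         mem[flowers[i]] += 1
--
--         while mem[flowers[i]] == cnt:
--             mem[flowers[j]] -= 1
--             j += 1
--         res = (res + i - j + 1) % mod
--
--     return res
-- ===== SOURCE B (Python) =====
-- def beautifulBouquet(flowers, cnt):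
--     if cnt < 0:
--         return 0
--     mod = 10 ** 9 + 7
--     positions = {}
--     left = 0
--     res = 0
--     for i, v in enumerate(flowers):
--         occ = positions.setdefault(v, [])
--         occ.append(i)
--         if len(occ) > cnt:
--             left = max(left, occ[len(occ) - 1 - cnt] + 1)
--         res = (res + i - left + 1) % mod
--     return res
-- ===== Notes on version B (the rewrite author's own statement) =====
-- stated objective: alternative
-- what changed: Replaces the Counter-decrementing inner shrink loop with a dict of per-value occurrence-index lists and a monotone left pointer obtained by a direct index lookup into the stored positions; there is no inner loop.
-- intended difference: For cnt < 0 and nonempty flowers A's shrink loop never fires and it returns the count of ALL subarrays (n(n+1)/2 mod 1e9+7), while B returns 0, which is intended: no nonempty subarray can have each value appearing at most a negative number of times. — e.g. on beautifulBouquet([1], -1): A returns 1, B returns 0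
import Mathlib
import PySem

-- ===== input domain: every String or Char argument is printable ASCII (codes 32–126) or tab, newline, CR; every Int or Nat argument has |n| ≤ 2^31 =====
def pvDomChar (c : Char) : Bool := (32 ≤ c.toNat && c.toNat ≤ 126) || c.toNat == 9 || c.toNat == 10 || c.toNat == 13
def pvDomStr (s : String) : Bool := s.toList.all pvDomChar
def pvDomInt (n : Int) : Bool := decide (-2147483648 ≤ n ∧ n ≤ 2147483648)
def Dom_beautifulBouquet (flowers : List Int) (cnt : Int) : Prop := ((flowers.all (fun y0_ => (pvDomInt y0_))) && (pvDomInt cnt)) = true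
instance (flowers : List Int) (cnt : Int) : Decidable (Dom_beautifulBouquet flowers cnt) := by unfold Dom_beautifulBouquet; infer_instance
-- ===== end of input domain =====

-- B replaces A's Counter-decrementing inner shrink loop by per-value occurrence-index
-- lists and a monotone left pointer (objective: alternative, same cost); for cnt < 0 on
-- nonempty input B intentionally returns 0 where A counts every subarray (see D_ below).

-- ===== PORT A =====
-- the `while mem[flowers[i]] == cnt` loop; fuel only makes it total — with the fuel
-- the port passes it never runs out (the window shrinks past index i first)
def pvShrinkA (flowers : List Int) (cnt v : Int) : Nat → PySem.Dict Int Int × Int → PySem.Dict Int Int × Int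
  | 0, st => st
  | fuel + 1, (mem, j) =>
    if mem.getD v 0 = cnt then
      -- flowers[j]: j is always in range when the loop body runs
      let fj := (PySem.List.pyGet? flowers j).getD 0
      pvShrinkA flowers cnt v fuel (mem.insert fj (mem.getD fj 0 - 1), j + 1)
    else (mem, j)

def pvStepA (flowers : List Int) (cnt mod : Int) (st : PySem.Dict Int Int × Int × Int) (i : Int) :
    PySem.Dict Int Int × Int × Int :=
  let mem := st.1
  let j := st.2.1
  let res := st.2.2
  -- flowers[i]: i comes from range(len(flowers)), always in range
  let v := (PySem.List.pyGet? flowers i).getD 0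
  let mem1 := mem.insert v (mem.getD v 0 + 1)
  let p := pvShrinkA flowers cnt v (flowers.length + 1) (mem1, j)
  (p.1, p.2, PySem.Int.mod (res + i - p.2 + 1) mod)

def beautifulBouquet (flowers : List Int) (cnt : Int) : Int :=
  let mod : Int := 10 ^ 9 + 7
  let cnt1 := cnt + 1
  ((PySem.List.pyRange 0 (PySem.List.len flowers) 1).foldl
      (pvStepA flowers cnt1 mod) (PySem.Dict.empty, 0, 0)).2.2

-- ===== PORT B =====
def pvStepB (cnt mod : Int) (st : PySem.Dict Int (List Int) × Int × Int) (iv : Int × Int) :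
    PySem.Dict Int (List Int) × Int × Int :=
  let pos := st.1
  let left := st.2.1
  let res := st.2.2
  let occ := pos.getD iv.2 [] ++ [iv.1]
  let pos1 := pos.insert iv.2 occ
  -- occ[len(occ) - 1 - cnt]: in range whenever len(occ) > cnt ≥ 0
  let left1 := if cnt < PySem.List.len occ then
      max left (PySem.List.pyGetD occ (PySem.List.len occ - 1 - cnt) 0 + 1)
    else left
  (pos1, left1, PySem.Int.mod (res + iv.1 - left1 + 1) mod)

def beautifulBouquet_alt (flowers : List Int) (cnt : Int) : Int :=
  if cnt < 0 then 0
  else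
    let mod : Int := 10 ^ 9 + 7
    ((PySem.List.enumerate flowers).foldl (pvStepB cnt mod)
        (PySem.Dict.empty, 0, 0)).2.2

-- ===== PRECONDITION & SPEC =====
-- For cnt < 0 and nonempty flowers A's shrink loop never fires and it returns the count of
-- ALL subarrays (n(n+1)/2 mod 1e9+7), while B returns 0, which is intended: no nonempty
-- subarray can have each value appearing at most a negative number of times.
def D_beautifulBouquet (flowers : List Int) (cnt : Int) : Prop := cnt < 0 ∧ flowers ≠ []
instance (flowers : List Int) (cnt : Int) : Decidable (D_beautifulBouquet flowers cnt) := by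
  unfold D_beautifulBouquet; infer_instance

def Spec_beautifulBouquet (flowers : List Int) (cnt : Int) (out : Int) : Prop :=
  ¬ D_beautifulBouquet flowers cnt → out = beautifulBouquet_alt flowers cnt
instance (flowers : List Int) (cnt : Int) (out : Int) : Decidable (Spec_beautifulBouquet flowers cnt out) := by
  unfold Spec_beautifulBouquet; infer_instance

def pvDiffWitness_beautifulBouquet : List Int × Int := ([1], -1)
def pvDiffWitnessOut_beautifulBouquet : Int × Int := (1, 0)

-- ===== CLAIM (what is proved, stated in full; the proofs are below) =====
def Claim_unchanged_beautifulBouquet : Prop := ∀ (flowers : List Int) (cnt : Int), Dom_beautifulBouquet flowers cnt → Spec_beautifulBouquet flowers cnt (beautifulBouquet flowers cnt)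
def Claim_changed_beautifulBouquet : Prop := Dom_beautifulBouquet (pvDiffWitness_beautifulBouquet.1) (pvDiffWitness_beautifulBouquet.2) ∧ D_beautifulBouquet (pvDiffWitness_beautifulBouquet.1) (pvDiffWitness_beautifulBouquet.2) ∧ beautifulBouquet (pvDiffWitness_beautifulBouquet.1) (pvDiffWitness_beautifulBouquet.2) = pvDiffWitnessOut_beautifulBouquet.1 ∧ beautifulBouquet_alt (pvDiffWitness_beautifulBouquet.1) (pvDiffWitness_beautifulBouquet.2) = pvDiffWitnessOut_beautifulBouquet.2 ∧ pvDiffWitnessOut_beautifulBouquet.1 ≠ pvDiffWitnessOut_beautifulBouquet.2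

-- ===== LEMMAS AND PROOFS =====

-- occurrence indices of value x among the first k flowers (strictly increasing Nats)
def pvOcc (f : List Int) (x : Int) (k : Nat) : List Nat :=
  (List.range k).filter (fun t => f.getD t 0 == x)

-- window count: occurrences of x in flowers[L..k)
def pvW (f : List Int) (x : Int) (L k : Nat) : Nat :=
  (pvOcc f x k).countP (fun t => L ≤ t)

lemma mem_pvOcc (f : List Int) (x : Int) (k t : Nat) :
    t ∈ pvOcc f x k ↔ t < k ∧ f.getD t 0 = x := by
  simp [pvOcc, List.mem_filter, List.mem_range]

lemma pairwise_pvOcc (f : List Int) (x : Int) (k : Nat) : (pvOcc f x k).Pairwise (· < ·) :=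
  List.Pairwise.filter _ List.pairwise_lt_range

lemma pvOcc_succ (f : List Int) (x : Int) (k : Nat) :
    pvOcc f x (k+1) = pvOcc f x k ++ (if f.getD k 0 = x then [k] else []) := by
  simp only [pvOcc, List.range_succ, List.filter_append, List.filter_cons, List.filter_nil]
  split_ifs with h <;> simp_all

lemma pvW_antitone (f : List Int) (x : Int) {m m' : Nat} (h : m ≤ m') (k : Nat) :
    pvW f x m' k ≤ pvW f x m k := by
  apply List.countP_mono_left
  intro a _ ha
  simp only [decide_eq_true_eq] at ha ⊢
  omega

lemma pvW_top (f : List Int) (x : Int) {L k : Nat} (h : k ≤ L) : pvW f x L k = 0 := by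
  apply List.countP_eq_zero.2
  intro a ha
  rw [mem_pvOcc] at ha
  simp only [decide_eq_true_eq]
  omega

lemma pvW_succ_right (f : List Int) (x : Int) {L k : Nat} (h : L ≤ k) :
    pvW f x L (k+1) = pvW f x L k + (if f.getD k 0 = x then 1 else 0) := by
  rw [pvW, pvOcc_succ, List.countP_append]
  split_ifs with hx <;> simp [pvW, h]

lemma countP_split (l : List Nat) (L : Nat) :
    l.countP (fun t => decide (L ≤ t)) = l.countP (fun t => decide (L+1 ≤ t)) + l.count L := by
  induction l with
  | nil => simp
  | cons a tl ih =>
    simp only [List.countP_cons, List.count_cons, ih, decide_eq_true_eq, beq_iff_eq]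
    split_ifs <;> omega

lemma pvW_succ_left (f : List Int) (x : Int) {L k : Nat} (hL : L < k) :
    pvW f x L k = pvW f x (L+1) k + (if f.getD L 0 = x then 1 else 0) := by
  rw [pvW, pvW, countP_split]
  congr 1
  split_ifs with h
  · exact List.count_eq_one_of_mem (List.Nodup.filter _ List.nodup_range) ((mem_pvOcc f x k L).2 ⟨hL, h⟩)
  · exact List.count_eq_zero.2 (fun hm => h ((mem_pvOcc f x k L).1 hm).2)

-- sorted-list counting: in a strictly increasing list, the elements ≥ / > the i-th
-- are exactly the i-th and its tail
lemma countP_sorted (l : List Nat) (hl : l.Pairwise (· < ·)) (i : Nat) (hi : i < l.length) :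
    l.countP (fun t => decide (l[i] ≤ t)) = l.length - i ∧
    l.countP (fun t => decide (l[i] < t)) = l.length - i - 1 := by
  obtain ⟨p, hp⟩ : ∃ p, l[i] = p := ⟨_, rfl⟩
  have hsplit : l.take i ++ p :: l.drop (i+1) = l := by
    rw [← hp, List.getElem_cons_drop hi, List.take_append_drop]
  have hl' : (l.take i ++ p :: l.drop (i+1)).Pairwise (· < ·) := by rw [hsplit]; exact hl
  have h1 : ∀ a ∈ l.take i, a < p :=
    fun a ha => (List.pairwise_append.1 hl').2.2 a ha p List.mem_cons_self
  have h2 : ∀ b ∈ l.drop (i+1), p < b :=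
    fun b hb => (List.pairwise_cons.1 (List.pairwise_append.1 hl').2.1).1 b hb
  have hlen2 : (l.drop (i+1)).length = l.length - i - 1 := by simp [List.length_drop]; omega
  rw [hp]
  constructor
  · conv_lhs => rw [← hsplit]
    rw [List.countP_append, List.countP_cons]
    rw [List.countP_eq_zero.2 (by intro a ha; simpa using Nat.not_le.2 (h1 a ha)),
      List.countP_eq_length.2 (by intro b hb; simpa using (h2 b hb).le)]
    simp [hlen2]; omega
  · conv_lhs => rw [← hsplit]
    rw [List.countP_append, List.countP_cons]
    rw [List.countP_eq_zero.2 (by intro a ha; simpa using Nat.not_lt.2 (h1 a ha).le),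
      List.countP_eq_length.2 (by intro b hb; simpa using h2 b hb)]
    simp [hlen2]

-- ===== the shrink loop's exact effect =====
lemma shrink_spec (f : List Int) (c : Nat) (k : Nat) :
    ∀ (fuel L : Nat) (mem : PySem.Dict Int Int),
      (∀ x, mem.getD x 0 = (pvW f x L (k+1) : Int)) → L ≤ k + 1 → k + 1 - L ≤ fuel →
      pvW f (f.getD k 0) L (k+1) ≤ c + 1 →
      ∃ L' : Nat,
        (pvShrinkA f ((c:Int)+1) (f.getD k 0) fuel (mem, (L:Int))).2 = (L' : Int) ∧
        (∀ x, (pvShrinkA f ((c:Int)+1) (f.getD k 0) fuel (mem, (L:Int))).1.getD x 0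
            = (pvW f x L' (k+1) : Int)) ∧
        L ≤ L' ∧ L' ≤ k + 1 ∧ pvW f (f.getD k 0) L' (k+1) ≤ c ∧
        (∀ l, L ≤ l → l < L' → pvW f (f.getD k 0) l (k+1) = c + 1) := by
  intro fuel
  induction fuel with
  | zero =>
    intro L mem hmem hL hfuel hval
    have hL1 : L = k + 1 := by omega
    subst hL1
    refine ⟨k+1, rfl, hmem, le_refl _, le_refl _, ?_, ?_⟩
    · rw [pvW_top f (f.getD k 0) (le_refl (k+1))]
      omega
    · intro l h1 h2
      omega
  | succ fuel ih =>
    intro L mem hmem hL hfuel hval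
    by_cases hcond : mem.getD (f.getD k 0) 0 = (c:Int)+1
    · have hWL : pvW f (f.getD k 0) L (k+1) = c + 1 := by
        have h := hmem (f.getD k 0)
        rw [h] at hcond
        exact_mod_cast hcond
      have hLk : L ≤ k := by
        by_contra h
        have hL1 : L = k + 1 := by omega
        rw [hL1, pvW_top f _ (le_refl _)] at hWL
        omega
      have hget : (PySem.List.pyGet? f (L:Int)).getD 0 = f.getD L 0 := by
        simp [PySem.List.pyGet?_natCast, List.getD_eq_getElem?_getD]
      have hstep : pvShrinkA f ((c:Int)+1) (f.getD k 0) (fuel+1) (mem, (L:Int))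
          = pvShrinkA f ((c:Int)+1) (f.getD k 0) fuel
              (mem.insert (f.getD L 0) (mem.getD (f.getD L 0) 0 - 1), (L:Int) + 1) := by
        simp only [pvShrinkA, if_pos hcond, hget]
      have hmem1 : ∀ x, (mem.insert (f.getD L 0) (mem.getD (f.getD L 0) 0 - 1)).getD x 0
          = (pvW f x (L+1) (k+1) : Int) := by
        intro x
        rw [PySem.Dict.getD_insert]
        by_cases hx : x = f.getD L 0
        · rw [if_pos hx, hmem (f.getD L 0),
            pvW_succ_left f (f.getD L 0) (show L < k + 1 by omega), if_pos rfl]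
          subst hx
          push_cast
          ring
        · rw [if_neg hx, hmem x, pvW_succ_left f x (show L < k + 1 by omega),
            if_neg (fun h => hx h.symm)]
          push_cast
          ring
      have hval1 : pvW f (f.getD k 0) (L+1) (k+1) ≤ c + 1 := by
        have := pvW_antitone f (f.getD k 0) (show L ≤ L + 1 by omega) (k+1)
        omega
      have hcast : ((L:Int) + 1) = ((L+1 : Nat) : Int) := by push_cast; ring
      rw [hstep, hcast]
      obtain ⟨L', e1, e2, e3, e4, e5, e6⟩ :=
        ih (L+1) _ hmem1 (by omega) (by omega) hval1
      refine ⟨L', e1, e2, by omega, e4, e5, ?_⟩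
      intro l h1 h2
      by_cases hl : l = L
      · rw [hl]; exact hWL
      · exact e6 l (by omega) h2
    · have hstep : pvShrinkA f ((c:Int)+1) (f.getD k 0) (fuel+1) (mem, (L:Int))
          = (mem, (L:Int)) := by
        simp only [pvShrinkA, if_neg hcond]
      rw [hstep]
      have hWL : pvW f (f.getD k 0) L (k+1) ≠ c + 1 := by
        intro h
        apply hcond
        rw [hmem (f.getD k 0), h]
        push_cast
        ring
      exact ⟨L, rfl, hmem, le_refl _, hL, by omega, by intro l h1 h2; omega⟩

-- the joint invariant after processing the first k flowers
def pvInv (f : List Int) (c : Nat) (k : Nat)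
    (sA : PySem.Dict Int Int × Int × Int)
    (sB : PySem.Dict Int (List Int) × Int × Int) : Prop :=
  ∃ L : Nat,
    sA.2.1 = (L : Int) ∧ sB.2.1 = (L : Int) ∧ sA.2.2 = sB.2.2 ∧ L ≤ k ∧
    (∀ x, sA.1.getD x 0 = (pvW f x L k : Int)) ∧
    (∀ x, sB.1.getD x [] = (pvOcc f x k).map (Nat.cast : Nat → Int)) ∧
    (∀ x, pvW f x L k ≤ c)

-- how B's direct index lookup selects the new left pointer
lemma left_sel (occN : List Nat) (hsorted : occN.Pairwise (· < ·)) (c L L' : Nat)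
    (W : Nat → Nat) (hW : ∀ m, W m = occN.countP (fun t => decide (m ≤ t)))
    (hWL' : W L' ≤ c) (hLL' : L ≤ L')
    (hchar : ∀ l, L ≤ l → l < L' → W l = c + 1) :
    (if (c:Int) < ((occN.length : Nat) : Int) then
        max (L:Int) (PySem.List.pyGetD (occN.map (Nat.cast : Nat → Int))
          ((occN.length : Int) - 1 - (c:Int)) 0 + 1)
      else (L:Int)) = (L':Int) := by
  have hWmono : ∀ m m', m ≤ m' → W m' ≤ W m := by
    intro m m' hm
    rw [hW, hW]
    exact List.countP_mono_left (fun a _ ha => by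
      simp only [decide_eq_true_eq] at ha ⊢
      omega)
  by_cases hclen : c < occN.length
  · rw [if_pos (by exact_mod_cast hclen)]
    obtain ⟨i, hi⟩ : ∃ i, i = occN.length - 1 - c := ⟨_, rfl⟩
    have hi_lt : i < occN.length := by omega
    have hidx : ((occN.length : Int) - 1 - (c:Int)) = (i : Int) := by omega
    have hpy : PySem.List.pyGetD (occN.map (Nat.cast : Nat → Int))
        ((occN.length : Int) - 1 - (c:Int)) 0 = ((occN[i] : Nat) : Int) := by
      rw [hidx, PySem.List.pyGetD_natCast, List.getD_eq_getElem?_getD, List.getElem?_map,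
        List.getElem?_eq_getElem hi_lt]
      simp
    rw [hpy]
    obtain ⟨p, hp⟩ : ∃ p, occN[i] = p := ⟨_, rfl⟩
    rw [hp]
    obtain ⟨hcle, hclt⟩ := countP_sorted occN hsorted i hi_lt
    rw [hp] at hcle hclt
    have hWp1 : W (p+1) = c := by
      rw [hW]
      have he : (fun t => decide (p+1 ≤ t)) = (fun t => decide (p < t)) :=
        funext fun t => decide_eq_decide.mpr (by omega)
      rw [he, hclt]
      omega
    have hWm : ∀ m, m ≤ p → c + 1 ≤ W m := by
      intro m hm
      have hmono : occN.countP (fun t => decide (p ≤ t)) ≤ occN.countP (fun t => decide (m ≤ t)) :=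
        List.countP_mono_left (fun a _ ha => by
          simp only [decide_eq_true_eq] at ha ⊢
          omega)
      rw [hcle] at hmono
      rw [hW]
      omega
    by_cases hLp : p + 1 ≤ L
    · have hL'L : L' = L := by
        by_contra h
        have hc1 := hchar L (le_refl _) (by omega)
        have := hWmono (p+1) L hLp
        omega
      rw [hL'L, max_eq_left (by omega)]
    · have h1 : L' ≤ p + 1 := by
        by_contra h
        have := hchar (p+1) (by omega) (by omega)
        omega
      have h2 : p + 1 ≤ L' := by
        by_contra h
        have := hWm L' (by omega)
        omega
      have hLp1 : L' = p + 1 := by omega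
      rw [hLp1, max_eq_right (by omega)]
      push_cast
      ring
  · rw [if_neg (by exact_mod_cast hclen)]
    have hWLlen : W L ≤ c := by
      rw [hW]
      have := List.countP_le_length (p := fun t => decide (L ≤ t)) (l := occN)
      omega
    have : L' = L := by
      by_contra h
      have := hchar L (le_refl _) (by omega)
      omega
    rw [this]

-- one synchronized step preserves the invariant
lemma step_inv (f : List Int) (c : Nat) (M : Int) (k : Nat) (hk : k < f.length)
    (sA : PySem.Dict Int Int × Int × Int) (sB : PySem.Dict Int (List Int) × Int × Int)
    (h : pvInv f c k sA sB) :
    pvInv f c (k+1) (pvStepA f ((c:Int)+1) M sA (k:Int))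
      (pvStepB (c:Int) M sB ((k:Int), f.getD k 0)) := by
  obtain ⟨L, hjA, hjB, hres, hLk, hmem, hpos, hval⟩ := h
  obtain ⟨memA, jA, resA⟩ := sA
  obtain ⟨posB, leftB, resB⟩ := sB
  simp only at hjA hjB hres hmem hpos hval
  subst hjA hjB hres
  have hget : (PySem.List.pyGet? f (k:Int)).getD 0 = f.getD k 0 := by
    simp [PySem.List.pyGet?_natCast, List.getD_eq_getElem?_getD]
  have hmem1 : ∀ x, (memA.insert (f.getD k 0) (memA.getD (f.getD k 0) 0 + 1)).getD x 0
      = (pvW f x L (k+1) : Int) := by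
    intro x
    rw [PySem.Dict.getD_insert]
    by_cases hx : x = f.getD k 0
    · subst hx
      rw [if_pos rfl, hmem (f.getD k 0), pvW_succ_right f (f.getD k 0) hLk, if_pos rfl]
      push_cast
      ring
    · rw [if_neg hx, hmem x, pvW_succ_right f x hLk, if_neg (fun hh => hx hh.symm)]
      push_cast
      ring
  have hval1 : pvW f (f.getD k 0) L (k+1) ≤ c + 1 := by
    rw [pvW_succ_right f _ hLk, if_pos rfl]
    have := hval (f.getD k 0)
    omega
  obtain ⟨L', e1, e2, e3, e4, e5, e6⟩ :=
    shrink_spec f c k (f.length + 1) L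
      (memA.insert (f.getD k 0) (memA.getD (f.getD k 0) 0 + 1)) hmem1 (by omega) (by omega) hval1
  have hocc_app : pvOcc f (f.getD k 0) (k+1) = pvOcc f (f.getD k 0) k ++ [k] := by
    rw [pvOcc_succ, if_pos rfl]
  have hoccI : posB.getD (f.getD k 0) [] ++ [((k:Nat) : Int)]
      = (pvOcc f (f.getD k 0) (k+1)).map (Nat.cast : Nat → Int) := by
    rw [hpos (f.getD k 0), hocc_app]
    simp
  have hleft : (if (c:Int) < PySem.List.len (posB.getD (f.getD k 0) [] ++ [((k:Nat) : Int)]) then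
        max (L:Int) (PySem.List.pyGetD (posB.getD (f.getD k 0) [] ++ [((k:Nat) : Int)])
          (PySem.List.len (posB.getD (f.getD k 0) [] ++ [((k:Nat) : Int)]) - 1 - (c:Int)) 0 + 1)
      else (L:Int)) = (L':Int) := by
    rw [hoccI]
    have hlen : PySem.List.len ((pvOcc f (f.getD k 0) (k+1)).map (Nat.cast : Nat → Int))
        = ((pvOcc f (f.getD k 0) (k+1)).length : Int) := by
      simp [PySem.List.len_eq]
    rw [hlen]
    exact left_sel (pvOcc f (f.getD k 0) (k+1)) (pairwise_pvOcc f _ _) c L L'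
      (fun m => pvW f (f.getD k 0) m (k+1)) (fun m => rfl) e5 e3 e6
  refine ⟨L', ?_, ?_, ?_, by omega, ?_, ?_, ?_⟩
  · simpa only [pvStepA, hget] using e1
  · simpa only [pvStepB] using hleft
  · simp only [pvStepA, pvStepB, hget]
    rw [e1, hleft]
  · intro x
    simpa only [pvStepA, hget] using e2 x
  · intro x
    simp only [pvStepB]
    rw [PySem.Dict.getD_insert]
    by_cases hx : x = f.getD k 0
    · subst hx
      rw [if_pos rfl]
      exact hoccI
    · rw [if_neg hx, hpos x, pvOcc_succ, if_neg (fun hh => hx hh.symm)]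
      simp
  · intro x
    by_cases hx : x = f.getD k 0
    · subst hx
      exact e5
    · have h1 : pvW f x L' (k+1) ≤ pvW f x L (k+1) := pvW_antitone f x e3 _
      have h2 : pvW f x L (k+1) = pvW f x L k := by
        rw [pvW_succ_right f x hLk, if_neg (fun hh => hx hh.symm)]
        omega
      have := hval x
      omega

def pvFoldA (f : List Int) (c : Nat) (M : Int) (k : Nat) : PySem.Dict Int Int × Int × Int :=
  (List.range k).foldl (fun s (t : Nat) => pvStepA f ((c:Int)+1) M s (t:Int)) (PySem.Dict.empty, 0, 0)

def pvFoldB (f : List Int) (c : Nat) (M : Int) (k : Nat) : PySem.Dict Int (List Int) × Int × Int :=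
  (List.range k).foldl (fun s (t : Nat) => pvStepB (c:Int) M s ((t:Int), f.getD t 0)) (PySem.Dict.empty, 0, 0)

lemma fold_inv (f : List Int) (c : Nat) (M : Int) :
    ∀ k, k ≤ f.length → pvInv f c k (pvFoldA f c M k) (pvFoldB f c M k) := by
  intro k
  induction k with
  | zero =>
    intro _
    exact ⟨0, rfl, rfl, rfl, le_refl _, by simp [pvFoldA, PySem.Dict.getD_empty, pvW, pvOcc],
      by simp [pvFoldB, PySem.Dict.getD_empty, pvOcc],
      by simp [pvW, pvOcc]⟩
  | succ k ih =>
    intro hk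
    have h1 : pvFoldA f c M (k+1) = pvStepA f ((c:Int)+1) M (pvFoldA f c M k) (k:Int) := by
      simp only [pvFoldA, List.range_succ, List.foldl_append, List.foldl_cons, List.foldl_nil]
    have h2 : pvFoldB f c M (k+1) = pvStepB (c:Int) M (pvFoldB f c M k) ((k:Int), f.getD k 0) := by
      simp only [pvFoldB, List.range_succ, List.foldl_append, List.foldl_cons, List.foldl_nil]
    rw [h1, h2]
    exact step_inv f c M k (by omega) _ _ (ih (by omega))

lemma portA_eq_fold (f : List Int) (c : Nat) :
    beautifulBouquet f (c:Int) = (pvFoldA f c (10 ^ 9 + 7) f.length).2.2 := by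
  simp only [beautifulBouquet, pvFoldA, PySem.List.len_eq, PySem.List.pyRange_zero_natCast,
    List.foldl_map]

lemma portB_eq_fold (f : List Int) (c : Nat) :
    beautifulBouquet_alt f (c:Int) = (pvFoldB f c (10 ^ 9 + 7) f.length).2.2 := by
  rw [beautifulBouquet_alt, if_neg (by omega)]
  have he : PySem.List.enumerate f
      = (PySem.List.pyRange 0 (PySem.List.len f) 1).map (fun j => (j, PySem.List.pyGetD f j 0)) :=
    PySem.List.enumerate_eq_map_pyRange f 0
  rw [he]
  simp only [pvFoldB, PySem.List.len_eq, PySem.List.pyRange_zero_natCast, List.map_map,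
    List.foldl_map, Function.comp_def, PySem.List.pyGetD_natCast]

theorem beautifulBouquet_main (f : List Int) (c : Nat) :
    beautifulBouquet f (c : Int) = beautifulBouquet_alt f (c : Int) := by
  rw [portA_eq_fold, portB_eq_fold]
  obtain ⟨L, _, _, hres, _⟩ := fold_inv f c (10 ^ 9 + 7) f.length (le_refl _)
  exact hres

lemma port_empty (cnt : Int) : beautifulBouquet [] cnt = beautifulBouquet_alt [] cnt := by
  simp [beautifulBouquet, beautifulBouquet_alt, PySem.List.enumerate,
    PySem.List.pyRange_one_eq_nil, PySem.List.len]

-- ===== VERDICT (by name: the statement is the Claim_ definition above) =====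
theorem beautifulBouquet_spec : Claim_unchanged_beautifulBouquet := by
  intro flowers cnt _ hD
  show beautifulBouquet flowers cnt = beautifulBouquet_alt flowers cnt
  rcases lt_or_ge cnt 0 with hc | hc
  · have hfe : flowers = [] := by
      by_contra h
      exact hD ⟨hc, h⟩
    subst hfe
    exact port_empty cnt
  · obtain ⟨c, rfl⟩ := Int.eq_ofNat_of_zero_le hc
    exact beautifulBouquet_main flowers c

theorem beautifulBouquet_changed : Claim_changed_beautifulBouquet := by
  unfold Claim_changed_beautifulBouquet; decide
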